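-- pv_equiv track=rewrite | github.com/gn4677-lang/line-liff-calorie-helper | backend/app/services/confirmation.py | choose_next_question_slot
-- ===== SOURCE A (Python) =====
-- def choose_next_question_slot(missing_slots: list[str]) -> str | None:
--     ordered = [
--         "main_items",
--         "portion",
--         "rice_portion",
--         "high_calorie_items",
--         "fried_or_sauce",
--         "sharing_ratio",
--         "leftover_ratio",
--         "drink",
--         "secondary_sides",
--         "dessert_presence",
--         "soup",
--     ]
--     for slot in ordered:
--         if slot in missing_slots:
--             return slot
--     return None
-- ===== SOURCE B (Python) =====
-- _ORDERED = [
--     "main_items",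
--     "portion",
--     "rice_portion",
--     "high_calorie_items",
--     "fried_or_sauce",
--     "sharing_ratio",
--     "leftover_ratio",
--     "drink",
--     "secondary_sides",
--     "dessert_presence",
--     "soup",
-- ]
-- _RANK = {slot: i for i, slot in enumerate(_ORDERED)}
--
--
-- def choose_next_question_slot(missing_slots: list[str]) -> str | None:
--     best = None  # (slot, rank) with the smallest rank seen so far
--     for slot in missing_slots:
--         r = _RANK.get(slot)
--         if r is not None and (best is None or r < best[1]):
--             best = (slot, r)
--     return best[0] if best is not None else None
-- ===== Notes on version B (the rewrite author's own statement) =====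
-- stated objective: faster
-- what changed: B inverts the traversal: instead of scanning the fixed priority list and testing membership in the input for each slot, it builds a slot->rank index once and makes a single pass over the input keeping the candidate with the smallest rank.
import Mathlib
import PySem

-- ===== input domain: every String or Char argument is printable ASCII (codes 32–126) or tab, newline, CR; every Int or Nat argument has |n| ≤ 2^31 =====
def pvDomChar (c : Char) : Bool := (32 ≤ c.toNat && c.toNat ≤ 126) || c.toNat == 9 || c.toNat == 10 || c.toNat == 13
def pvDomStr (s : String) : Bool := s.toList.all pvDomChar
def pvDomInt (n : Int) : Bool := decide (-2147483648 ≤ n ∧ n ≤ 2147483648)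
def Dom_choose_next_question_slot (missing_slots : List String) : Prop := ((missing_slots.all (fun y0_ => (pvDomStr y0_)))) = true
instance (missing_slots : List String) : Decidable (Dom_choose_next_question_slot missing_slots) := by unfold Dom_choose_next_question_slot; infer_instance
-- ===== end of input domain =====

-- B inverts the traversal: a slot→rank index is built once and the INPUT is scanned in one
-- pass keeping the smallest-rank candidate, instead of scanning the priority list and testing
-- membership in the input for each slot (objective: alternative decomposition, same result).

-- ===== PORT A =====
-- the fixed priority list `ordered` of A
def pvOrdered : List String :=
  ["main_items",
   "portion",
   "rice_portion",
   "high_calorie_items",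
   "fried_or_sauce",
   "sharing_ratio",
   "leftover_ratio",
   "drink",
   "secondary_sides",
   "dessert_presence",
   "soup"]

-- the `for slot in ordered: if slot in missing_slots: return slot` loop of A
def pvChooseLoop (missing_slots : List String) : List String → Option String
  | [] => none
  | o :: rest => if missing_slots.contains o then some o else pvChooseLoop missing_slots rest

def choose_next_question_slot (missing_slots : List String) : Option String :=
  pvChooseLoop missing_slots pvOrdered

-- ===== PORT B =====
-- _RANK = {slot: i for i, slot in enumerate(_ORDERED)}
def pvRank : PySem.Dict String Int :=
  (PySem.List.enumerate pvOrdered).foldl (fun d p => d.insert p.2 p.1) PySem.Dict.empty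

-- one loop iteration of B: keep (slot, rank) with the smallest rank seen so far
def pvStepB (best : Option (String × Int)) (s : String) : Option (String × Int) :=
  match pvRank.get? s with
  | none => best
  | some r =>
    match best with
    | none => some (s, r)
    | some b => if r < b.2 then some (s, r) else best

def choose_next_question_slot_alt (missing_slots : List String) : Option String :=
  (missing_slots.foldl pvStepB none).map Prod.fst

-- ===== PRECONDITION & SPEC =====
def Spec_choose_next_question_slot (missing_slots : List String) (out : Option String) : Prop := out = choose_next_question_slot_alt missing_slots
instance (missing_slots : List String) (out : Option String) : Decidable (Spec_choose_next_question_slot missing_slots out) := by unfold Spec_choose_next_question_slot; infer_instance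

-- ===== CLAIM (what is proved, stated in full; the proofs are below) =====
def Claim_equal_choose_next_question_slot : Prop := ∀ (missing_slots : List String), Dom_choose_next_question_slot missing_slots → Spec_choose_next_question_slot missing_slots (choose_next_question_slot missing_slots)

-- ===== LEMMAS AND PROOFS =====

-- the rank dict is the literal association list of the 11 slots
theorem pvRank_eq : pvRank = PySem.Dict.mk [("main_items", 0), ("portion", 1), ("rice_portion", 2), ("high_calorie_items", 3), ("fried_or_sauce", 4), ("sharing_ratio", 5), ("leftover_ratio", 6), ("drink", 7), ("secondary_sides", 8), ("dessert_presence", 9), ("soup", 10)] := by rfl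

-- a successful rank lookup names an index into pvOrdered
set_option maxHeartbeats 1000000 in
theorem pvRank_some (s : String) (r : Int) (h : pvRank.get? s = some r) :
    ∃ i : Nat, r = (i : Int) ∧ pvOrdered[i]? = some s := by
  rw [pvRank_eq] at h
  simp only [PySem.Dict.get?_mk_cons] at h
  split_ifs at h with h1 h2 h3 h4 h5 h6 h7 h8 h9 h10 h11
  · exact ⟨0, by simp_all, by rw [← eq_of_beq h1]; decide⟩
  · exact ⟨1, by simp_all, by rw [← eq_of_beq h2]; decide⟩
  · exact ⟨2, by simp_all, by rw [← eq_of_beq h3]; decide⟩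
  · exact ⟨3, by simp_all, by rw [← eq_of_beq h4]; decide⟩
  · exact ⟨4, by simp_all, by rw [← eq_of_beq h5]; decide⟩
  · exact ⟨5, by simp_all, by rw [← eq_of_beq h6]; decide⟩
  · exact ⟨6, by simp_all, by rw [← eq_of_beq h7]; decide⟩
  · exact ⟨7, by simp_all, by rw [← eq_of_beq h8]; decide⟩
  · exact ⟨8, by simp_all, by rw [← eq_of_beq h9]; decide⟩
  · exact ⟨9, by simp_all, by rw [← eq_of_beq h10]; decide⟩
  · exact ⟨10, by simp_all, by rw [← eq_of_beq h11]; decide⟩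
  · exact absurd h (by simp [PySem.Dict.get?])

-- an index into pvOrdered has that index as its rank
theorem pvRank_of_idx (i : Nat) (s : String) (h : pvOrdered[i]? = some s) :
    pvRank.get? s = some (i : Int) := by
  have hi : i < 11 := by
    by_contra hge
    rw [List.getElem?_eq_none (by simp [pvOrdered]; omega)] at h
    exact absurd h (by simp)
  interval_cases i <;> (simp [pvOrdered] at h; subst h; decide)

-- a member of pvOrdered has a rank
theorem pvRank_of_mem (s : String) (h : s ∈ pvOrdered) : ∃ r, pvRank.get? s = some r := by
  obtain ⟨i, hi, rfl⟩ := List.getElem_of_mem h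
  exact ⟨(i : Int), pvRank_of_idx i _ (by simp [hi])⟩

-- A's loop, when it returns none, found no priority slot in the input
theorem loop_none (m : List String) : ∀ L, pvChooseLoop m L = none → ∀ o ∈ L, o ∉ m := by
  intro L
  induction L with
  | nil => simp
  | cons o rest ih =>
    intro h x hx
    simp only [pvChooseLoop] at h
    split at h
    · exact absurd h (by simp)
    · rcases List.mem_cons.1 hx with rfl | hx
      · simpa using ‹¬ m.contains x = true›
      · exact ih h x hx

-- A's loop, when it returns some a, returns the first priority slot present in the input
theorem loop_some (m : List String) : ∀ L a, pvChooseLoop m L = some a →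
    ∃ l₁ l₂, L = l₁ ++ a :: l₂ ∧ a ∈ m ∧ ∀ x ∈ l₁, x ∉ m := by
  intro L
  induction L with
  | nil => simp [pvChooseLoop]
  | cons o rest ih =>
    intro a h
    simp only [pvChooseLoop] at h
    split at h
    · rename_i hc
      injection h with h'
      subst h'
      exact ⟨[], rest, rfl, by simpa using hc, by simp⟩
    · obtain ⟨l₁, l₂, hL, ham, hl₁⟩ := ih a h
      refine ⟨o :: l₁, l₂, by simp [hL], ham, ?_⟩
      intro x hx
      rcases List.mem_cons.1 hx with rfl | hx
      · simpa using ‹¬ m.contains x = true›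
      · exact hl₁ x hx

-- invariant of B's fold over the already-processed prefix `seen`
def GoodB (seen : List String) (best : Option (String × Int)) : Prop :=
  (best = none → ∀ s ∈ seen, pvRank.get? s = none) ∧
  (∀ s r, best = some (s, r) → s ∈ seen ∧ pvRank.get? s = some r ∧
    ∀ t ∈ seen, ∀ q, pvRank.get? t = some q → r ≤ q)

theorem goodB_step (seen : List String) (b : Option (String × Int)) (s : String)
    (hg : GoodB seen b) : GoodB (seen ++ [s]) (pvStepB b s) := by
  obtain ⟨h0, h1⟩ := hg
  cases hrs : pvRank.get? s with
  | none =>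
    have hstep : pvStepB b s = b := by unfold pvStepB; rw [hrs]
    rw [hstep]
    refine ⟨?_, ?_⟩
    · intro hb t ht
      rcases List.mem_append.1 ht with ht | ht
      · exact h0 hb t ht
      · simp at ht; subst ht; exact hrs
    · intro t r heq
      obtain ⟨hm, hr, hmin⟩ := h1 t r heq
      refine ⟨List.mem_append.2 (Or.inl hm), hr, ?_⟩
      intro u hu q hq
      rcases List.mem_append.1 hu with hu | hu
      · exact hmin u hu q hq
      · simp at hu; subst hu; rw [hrs] at hq; exact absurd hq (by simp)
  | some rs =>
    cases b with
    | none =>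
      have hstep : pvStepB none s = some (s, rs) := by unfold pvStepB; rw [hrs]
      rw [hstep]
      refine ⟨fun h => by exact absurd h (by simp), ?_⟩
      intro t r heq
      obtain ⟨h1', h2'⟩ : s = t ∧ rs = r := by simpa using heq
      subst h1'; subst h2'
      refine ⟨by simp, hrs, ?_⟩
      intro u hu q hq
      rcases List.mem_append.1 hu with hu | hu
      · rw [h0 rfl u hu] at hq; exact absurd hq (by simp)
      · simp at hu; subst hu; rw [hrs] at hq
        injection hq with h'; omega
    | some bp =>
      obtain ⟨hbm, hbr, hbmin⟩ := h1 bp.1 bp.2 rfl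
      by_cases hlt : rs < bp.2
      · have hstep : pvStepB (some bp) s = some (s, rs) := by
          unfold pvStepB; rw [hrs]; simp [hlt]
        rw [hstep]
        refine ⟨fun h => by exact absurd h (by simp), ?_⟩
        intro t r heq
        obtain ⟨h1', h2'⟩ : s = t ∧ rs = r := by simpa using heq
        subst h1'; subst h2'
        refine ⟨by simp, hrs, ?_⟩
        intro u hu q hq
        rcases List.mem_append.1 hu with hu | hu
        · have := hbmin u hu q hq; omega
        · simp at hu; subst hu; rw [hrs] at hq
          injection hq with h'; omega
      · have hstep : pvStepB (some bp) s = some bp := by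
          unfold pvStepB; rw [hrs]; simp [hlt]
        rw [hstep]
        refine ⟨fun h => by exact absurd h (by simp), ?_⟩
        intro t r heq
        obtain ⟨hm, hr, hmin⟩ := h1 t r heq
        refine ⟨List.mem_append.2 (Or.inl hm), hr, ?_⟩
        intro u hu q hq
        rcases List.mem_append.1 hu with hu | hu
        · exact hmin u hu q hq
        · simp at hu; subst hu; rw [hrs] at hq
          injection hq with h'
          injection heq with h2
          subst h2
          simp only [] at hlt
          omega
  
theorem goodB_fold : ∀ (m seen : List String) (b : Option (String × Int)),
    GoodB seen b → GoodB (seen ++ m) (m.foldl pvStepB b) := by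
  intro m
  induction m with
  | nil => intro seen b h; simpa using h
  | cons s rest ih =>
    intro seen b h
    have := ih (seen ++ [s]) (pvStepB b s) (goodB_step seen b s h)
    simpa [List.append_assoc] using this

theorem goodB_main (m : List String) : GoodB m (m.foldl pvStepB none) := by
  have := goodB_fold m [] none ⟨fun _ => by simp, fun s r h => by simp at h⟩
  simpa using this

-- ===== VERDICT (by name: the statement is the Claim_ definition above) =====
theorem choose_next_question_slot_spec : Claim_equal_choose_next_question_slot := by
  intro m _
  unfold Spec_choose_next_question_slot choose_next_question_slot choose_next_question_slot_alt
  obtain ⟨g0, g1⟩ := goodB_main m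
  cases hB : m.foldl pvStepB none with
  | none =>
    cases hA : pvChooseLoop m pvOrdered with
    | none => simp
    | some a =>
      exfalso
      obtain ⟨l₁, l₂, hL, ham, _⟩ := loop_some m pvOrdered a hA
      obtain ⟨r, hr⟩ := pvRank_of_mem a (by simp [hL])
      exact absurd hr (by simp [g0 hB a ham])
  | some p =>
    obtain ⟨hmem, hrk, hmin⟩ := g1 p.1 p.2 (by rw [hB])
    obtain ⟨i, hri, hidx⟩ := pvRank_some p.1 p.2 hrk
    cases hA : pvChooseLoop m pvOrdered with
    | none =>
      exact absurd hmem (loop_none m pvOrdered hA p.1 (List.mem_of_getElem? hidx))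
    | some a =>
      obtain ⟨l₁, l₂, hL, ham, hl₁⟩ := loop_some m pvOrdered a hA
      have hidxa : pvOrdered[l₁.length]? = some a := by simp [hL]
      have hra : pvRank.get? a = some (l₁.length : Int) := pvRank_of_idx _ _ hidxa
      have hle : p.2 ≤ (l₁.length : Int) := hmin a ham _ hra
      have hige : l₁.length ≤ i := by
        by_contra hlt
        push_neg at hlt
        have hp1 : p.1 ∈ l₁ := by
          have h' := hidx
          rw [hL, List.getElem?_append_left hlt] at h'
          exact List.mem_of_getElem? h'
        exact hl₁ p.1 hp1 hmem
      have hieq : i = l₁.length := by omega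
      subst hieq
      have : p.1 = a := by rw [hidxa] at hidx; injection hidx with hx; exact hx.symm
      simp [this]
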